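-- pv_equiv track=rewrite | github.com/future-internet-lab/cloud-resource-allocation-simulator | Algorithm.py | perform
-- ===== SOURCE A (Python) =====
-- from typing import List, Tuple
--
-- def perform(bin: List[int], package: int) -> int:
--     bin_quantity = len(bin)
--     bestIdx = -1
--     for i in range(bin_quantity):
--         if bin[i] >= package:
--             if bestIdx == -1:
--                 bestIdx = i
--             elif bin[bestIdx] > bin[i]:
--                 bestIdx = i
--     return bestIdx
-- ===== SOURCE B (Python) =====
-- from typing import List
--
-- def perform(bin: List[int], package: int) -> int:
--     # Sort (capacity, index) pairs; the first pair whose capacity fits is the best fit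
--     # (smallest capacity >= package, smallest index among equal capacities).
--     for v, i in sorted((v, i) for i, v in enumerate(bin)):
--         if v >= package:
--             return i
--     return -1
-- ===== Notes on version B (the rewrite author's own statement) =====
-- stated objective: alternative
-- what changed: Replaces A's single running-best scan by sorting the (capacity, index) pairs and returning the index of the first pair whose capacity fits (lexicographic sort preserves A's first-index tie-break).
import Mathlib
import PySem

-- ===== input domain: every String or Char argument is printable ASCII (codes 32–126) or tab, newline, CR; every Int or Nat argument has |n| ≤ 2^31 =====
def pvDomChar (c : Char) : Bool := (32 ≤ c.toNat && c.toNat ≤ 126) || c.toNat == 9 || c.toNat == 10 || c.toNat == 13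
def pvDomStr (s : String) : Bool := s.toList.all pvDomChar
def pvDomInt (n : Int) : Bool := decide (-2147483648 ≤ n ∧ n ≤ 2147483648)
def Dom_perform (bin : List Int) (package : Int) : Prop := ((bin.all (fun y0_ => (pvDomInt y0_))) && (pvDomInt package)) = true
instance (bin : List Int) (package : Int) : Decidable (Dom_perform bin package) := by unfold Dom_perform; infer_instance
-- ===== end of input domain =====

-- B replaces A's running-best scan by sorting the (capacity, index) pairs and returning the
-- index of the first pair that fits (alternative algorithm, same return value, proved equal).

-- ===== PORT A =====
def perform (bin : List Int) (package : Int) : Int :=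
  let bin_quantity : Int := bin.length
  (PySem.List.pyRange 0 bin_quantity 1).foldl
    (fun bestIdx i =>
      if PySem.List.pyGetD bin i 0 ≥ package then
        if bestIdx = -1 then i
        else if PySem.List.pyGetD bin bestIdx 0 > PySem.List.pyGetD bin i 0 then i
        else bestIdx
      else bestIdx)
    (-1)

-- ===== PORT B =====
-- the 'for v, i in …: if v >= package: return i' loop of Source B
def pvFirstFit (package : Int) : List (Int × Int) → Int
  | [] => -1
  | (v, i) :: t => if v ≥ package then i else pvFirstFit package t

def perform_alt (bin : List Int) (package : Int) : Int :=
  pvFirstFit package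
    (PySem.List.sorted2 ((PySem.List.enumerate bin 0).map (fun p => (p.2, p.1)))
      (fun p => p.1) (fun p => p.2) false)

-- ===== PRECONDITION & SPEC =====
def Spec_perform (bin : List Int) (package : Int) (out : Int) : Prop := out = perform_alt bin package
instance (bin : List Int) (package : Int) (out : Int) : Decidable (Spec_perform bin package out) := by unfold Spec_perform; infer_instance

-- ===== CLAIM (what is proved, stated in full; the proofs are below) =====
def Claim_equal_perform : Prop := ∀ (bin : List Int) (package : Int), Dom_perform bin package → Spec_perform bin package (perform bin package)

-- ===== LEMMAS AND PROOFS =====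

-- lexicographic order on (capacity, index) pairs
def pvLexLe (a b : Int × Int) : Prop := a.1 < b.1 ∨ (a.1 = b.1 ∧ a.2 ≤ b.2)

-- "r is the best-fit answer for the pair multiset `pairs`": either no pair fits and r = -1,
-- or r is the index of a lexicographically minimal fitting pair.
def pvBest (pairs : List (Int × Int)) (package r : Int) : Prop :=
  (r = -1 ∧ ∀ p ∈ pairs, p.1 < package) ∨
  (∃ p ∈ pairs, package ≤ p.1 ∧ r = p.2 ∧ ∀ q ∈ pairs, package ≤ q.1 → pvLexLe p q)

theorem pvBest_unique (pairs : List (Int × Int)) (package r r' : Int)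
    (h : pvBest pairs package r) (h' : pvBest pairs package r') : r = r' := by
  rcases h with ⟨hr, hall⟩ | ⟨p, hp, hfit, hr, hmin⟩
  · rcases h' with ⟨hr', _⟩ | ⟨p, hp, hfit, _, _⟩
    · omega
    · exact absurd hfit (by have := hall p hp; omega)
  · rcases h' with ⟨_, hall'⟩ | ⟨q, hq, hfit', hr', hmin'⟩
    · exact absurd hfit (by have := hall' p hp; omega)
    · have h1 := hmin q hq hfit'
      have h2 := hmin' p hp hfit
      unfold pvLexLe at h1 h2
      omega

theorem pvBest_perm {pairs pairs' : List (Int × Int)} (hp : pairs.Perm pairs')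
    (package r : Int) (h : pvBest pairs package r) : pvBest pairs' package r := by
  rcases h with ⟨hr, hall⟩ | ⟨p, hpm, hfit, hr, hmin⟩
  · exact Or.inl ⟨hr, fun q hq => hall q (hp.mem_iff.mpr hq)⟩
  · exact Or.inr ⟨p, hp.mem_iff.mp hpm, hfit,
      hr, fun q hq hfq => hmin q (hp.mem_iff.mpr hq) hfq⟩

-- B's scan over a lex-sorted pair list returns the best fit
theorem pvFirstFit_best (package : Int) (l : List (Int × Int))
    (hl : l.Pairwise pvLexLe) : pvBest l package (pvFirstFit package l) := by
  induction l with
  | nil => exact Or.inl ⟨rfl, by simp⟩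
  | cons p t ih =>
    rw [List.pairwise_cons] at hl
    obtain ⟨hhd, htl⟩ := hl
    obtain ⟨v, i⟩ := p
    by_cases hfit : v ≥ package
    · refine Or.inr ⟨(v, i), by simp, hfit, by simp [pvFirstFit, hfit], ?_⟩
      intro q hq _
      rcases List.mem_cons.mp hq with h | h
      · subst h; exact Or.inr ⟨rfl, le_refl _⟩
      · exact hhd q h
    · have hrec := ih htl
      have hstep : pvFirstFit package ((v, i) :: t) = pvFirstFit package t := by
        simp [pvFirstFit, hfit]
      rw [hstep]
      rcases hrec with ⟨hr, hall⟩ | ⟨p, hpm, hf, hr, hmin⟩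
      · exact Or.inl ⟨hr, by
          intro q hq
          rcases List.mem_cons.mp hq with h | h
          · subst h; omega
          · exact hall q h⟩
      · refine Or.inr ⟨p, List.mem_cons_of_mem _ hpm, hf, hr, ?_⟩
        intro q hq hfq
        rcases List.mem_cons.mp hq with h | h
        · subst h; exact absurd hfq (by omega)
        · exact hmin q h hfq

-- sorted2 with projection keys is sorted with the lexicographic key
theorem pvSorted2_eq_sorted_lex (xs : List (Int × Int)) :
    PySem.List.sorted2 xs (fun p => p.1) (fun p => p.2) false
      = PySem.List.sorted xs (fun p => toLex p) false := by
  unfold PySem.List.sorted2 PySem.List.sorted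
  have hb : (fun (a b : Int × Int) =>
        decide (a.1 < b.1) || (!decide (b.1 < a.1) && decide (a.2 < b.2)))
      = (fun (a b : Int × Int) => decide (toLex a < toLex b)) := by
    funext a b
    rw [Bool.eq_iff_iff]
    simp only [Prod.Lex.lt_iff, ofLex_toLex, Bool.or_eq_true, Bool.and_eq_true,
      Bool.not_eq_true', decide_eq_true_eq, decide_eq_false_iff_not]
    omega
  simp only [if_neg (by decide : ¬ (false = true))]
  rw [hb]

-- the sorted pair list is pairwise lex-≤
theorem pvSorted_pairwise_lexLe (xs : List (Int × Int)) :
    (PySem.List.sorted xs (fun p => toLex p) false).Pairwise pvLexLe := by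
  have h := PySem.List.sorted_pairwise xs (fun p => toLex p)
  refine h.imp ?_
  intro a b hab
  rw [Prod.Lex.le_iff] at hab
  exact hab

-- A's fold over any strictly increasing nonnegative index list computes the best fit
-- for the corresponding (capacity, index) pairs
theorem pvA_fold_best (bin : List Int) (package : Int) (l : List Int)
    (hl : l.Pairwise (· < ·)) (hpos : ∀ j ∈ l, 0 ≤ j) :
    pvBest (l.map (fun j => (PySem.List.pyGetD bin j 0, j))) package
      (l.foldl
        (fun bestIdx i =>
          if PySem.List.pyGetD bin i 0 ≥ package then
            if bestIdx = -1 then i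
            else if PySem.List.pyGetD bin bestIdx 0 > PySem.List.pyGetD bin i 0 then i
            else bestIdx
          else bestIdx)
        (-1)) := by
  induction l using List.reverseRecOn with
  | nil => exact Or.inl ⟨rfl, by simp⟩
  | append_singleton l i ih =>
    have hl' : l.Pairwise (· < ·) := hl.sublist (List.sublist_append_left _ _)
    have hli : ∀ j ∈ l, j < i := by
      intro j hj
      have := List.pairwise_append.mp hl
      exact this.2.2 j hj i (by simp)
    have hpos' : ∀ j ∈ l, 0 ≤ j := fun j hj => hpos j (by simp [hj])
    have hi : 0 ≤ i := hpos i (by simp)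
    have hrec := ih hl' hpos'
    rw [List.foldl_append, List.map_append]
    simp only [List.foldl_cons, List.foldl_nil, List.map_cons, List.map_nil]
    set r := l.foldl
        (fun bestIdx i =>
          if PySem.List.pyGetD bin i 0 ≥ package then
            if bestIdx = -1 then i
            else if PySem.List.pyGetD bin bestIdx 0 > PySem.List.pyGetD bin i 0 then i
            else bestIdx
          else bestIdx)
        (-1) with hr
    by_cases hfit : PySem.List.pyGetD bin i 0 ≥ package
    · rw [if_pos hfit]
      rcases hrec with ⟨hr1, hall⟩ | ⟨p, hpm, hf, hrp, hmin⟩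
      · rw [if_pos hr1]
        refine Or.inr ⟨(PySem.List.pyGetD bin i 0, i), by simp, hfit, rfl, ?_⟩
        intro q hq hfq
        rcases List.mem_append.mp hq with h | h
        · exact absurd hfq (by have := hall q h; omega)
        · simp at h; subst h; exact Or.inr ⟨rfl, le_refl _⟩
      · have hrne : r ≠ -1 := by
          obtain ⟨j, hj, hpj⟩ := List.mem_map.mp hpm
          have h0 := hpos' j hj
          have hp2 : p.2 = j := by rw [← hpj]
          omega
        rw [if_neg hrne]
        obtain ⟨j, hj, hpj⟩ := List.mem_map.mp hpm
        have hrj : r = j := by rw [hrp, ← hpj]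
        have hp1 : PySem.List.pyGetD bin r 0 = p.1 := by rw [hrj, ← hpj]
        by_cases hsw : PySem.List.pyGetD bin r 0 > PySem.List.pyGetD bin i 0
        · rw [if_pos hsw]
          refine Or.inr ⟨(PySem.List.pyGetD bin i 0, i), by simp, hfit, rfl, ?_⟩
          intro q hq hfq
          rcases List.mem_append.mp hq with h | h
          · have hpq := hmin q h hfq
            unfold pvLexLe at hpq ⊢
            dsimp only at hpq ⊢
            rw [hp1] at hsw
            omega
          · simp at h; subst h; exact Or.inr ⟨rfl, le_refl _⟩
        · rw [if_neg hsw]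
          refine Or.inr ⟨p, List.mem_append_left _ hpm, hf, hrp, ?_⟩
          intro q hq hfq
          rcases List.mem_append.mp hq with h | h
          · exact hmin q h hfq
          · simp at h; subst h
            unfold pvLexLe
            dsimp only
            rw [hp1] at hsw
            have hji : j < i := hli j hj
            have hp2 : p.2 = j := by rw [← hpj]
            omega
    · rw [if_neg hfit]
      rcases hrec with ⟨hr1, hall⟩ | ⟨p, hpm, hf, hrp, hmin⟩
      · refine Or.inl ⟨hr1, ?_⟩
        intro q hq
        rcases List.mem_append.mp hq with h | h
        · exact hall q h
        · simp at h; subst h; omega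
      · refine Or.inr ⟨p, List.mem_append_left _ hpm, hf, hrp, ?_⟩
        intro q hq hfq
        rcases List.mem_append.mp hq with h | h
        · exact hmin q h hfq
        · simp at h; subst h; exact absurd hfq (by omega)

-- ===== VERDICT (by name: the statement is the Claim_ definition above) =====
theorem perform_spec : Claim_equal_perform := by
  intro bin package _
  show perform bin package = perform_alt bin package
  -- the two pair lists are literally equal
  have hpairs : (PySem.List.enumerate bin 0).map (fun p => (p.2, p.1))
      = (PySem.List.pyRange 0 (bin.length : Int) 1).map
          (fun j => (PySem.List.pyGetD bin j 0, j)) := by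
    rw [PySem.List.enumerate_eq_map_pyRange bin 0, List.map_map]
    rfl
  -- A computes a best fit
  have hA : pvBest ((PySem.List.pyRange 0 (bin.length : Int) 1).map
        (fun j => (PySem.List.pyGetD bin j 0, j))) package (perform bin package) := by
    unfold perform
    exact pvA_fold_best bin package _
      (PySem.List.pairwise_lt_pyRange_one 0 _)
      (fun j hj => ((PySem.List.mem_pyRange_one).mp hj).1)
  -- B computes a best fit
  have hB : pvBest ((PySem.List.pyRange 0 (bin.length : Int) 1).map
        (fun j => (PySem.List.pyGetD bin j 0, j))) package (perform_alt bin package) := by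
    unfold perform_alt
    rw [pvSorted2_eq_sorted_lex]
    refine pvBest_perm ?_ package _ (pvFirstFit_best package _ (pvSorted_pairwise_lexLe _))
    rw [← hpairs]
    exact PySem.List.sorted_perm _ _ _
  exact pvBest_unique _ package _ _ hA hB
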